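-- pv_equiv track=rewrite | github.com/docxology/MetaInformAnt | src/metainformant/dna/motifs.py | discover_motifs
-- ===== SOURCE A (Python) =====
-- from typing import Dict, List, Tuple
--
-- def discover_motifs(sequences: List[str], motif_length: int = 6, min_occurrences: int = 2) -> List[Tuple[str, int]]:
--     """Discover overrepresented motifs in a set of sequences.
--
--     This is a simple motif discovery algorithm that finds k-mers that appear
--     more frequently than expected by chance.
--
--     Args:
--         sequences: List of DNA sequences
--         motif_length: Length of motifs to discover (default: 6)
--         min_occurrences: Minimum number of occurrences required (default: 2)
--
--     Returns:
--         List of tuples (motif, count) sorted by frequency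
--
--     Example:
--         >>> seqs = ["ATCGATCGATCG", "ATCGATCGATCG", "GCTAGCTAGCTA"]
--         >>> motifs = discover_motifs(seqs, motif_length=4, min_occurrences=2)
--         >>> len(motifs) >= 0
--         True
--     """
--     if not sequences or motif_length <= 0:
--         return []
--
--     from collections import Counter
--
--     # Extract all k-mers
--     kmer_counts = Counter()
--
--     for seq in sequences:
--         seq = seq.upper()
--         for i in range(len(seq) - motif_length + 1):
--             kmer = seq[i:i + motif_length]
--             # Only consider canonical nucleotides
--             if all(c in 'ACGT' for c in kmer):
--                 kmer_counts[kmer] += 1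
--
--     # Filter by minimum occurrences
--     filtered_motifs = [
--         (motif, count) for motif, count in kmer_counts.items()
--         if count >= min_occurrences
--     ]
--
--     # Sort by frequency (descending)
--     filtered_motifs.sort(key=lambda x: x[1], reverse=True)
--
--     return filtered_motifs
-- ===== SOURCE B (Python) =====
-- def _acgt_runs(seq):
--     """Maximal runs of canonical nucleotides in seq, left to right."""
--     runs = []
--     cur = ""
--     for ch in seq:
--         if ch in "ACGT":
--             cur += ch
--         else:
--             if cur:
--                 runs.append(cur)
--             cur = ""
--     if cur:
--         runs.append(cur)
--     return runs
--
--
-- def discover_motifs(sequences, motif_length=6, min_occurrences=2):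
--     if not sequences or motif_length <= 0:
--         return []
--
--     from collections import Counter
--
--     kmers = []
--     for seq in sequences:
--         for run in _acgt_runs(seq.upper()):
--             for j in range(len(run) - motif_length + 1):
--                 kmers.append(run[j:j + motif_length])
--
--     counts = Counter(kmers)
--     return sorted([(m, c) for m, c in counts.items() if c >= min_occurrences],
--                   key=lambda x: x[1], reverse=True)
-- ===== Notes on version B (the rewrite author's own statement) =====
-- stated objective: alternative
-- what changed: B splits each uppercased sequence once into maximal runs of canonical ACGT nucleotides, collects every window of every run into one list and builds a single Counter from it, instead of A's per-window all(c in 'ACGT') validity re-scan with incremental counter updates; the >=min_occurrences filter and the stable sort by count descending are unchanged.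
import Mathlib
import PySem

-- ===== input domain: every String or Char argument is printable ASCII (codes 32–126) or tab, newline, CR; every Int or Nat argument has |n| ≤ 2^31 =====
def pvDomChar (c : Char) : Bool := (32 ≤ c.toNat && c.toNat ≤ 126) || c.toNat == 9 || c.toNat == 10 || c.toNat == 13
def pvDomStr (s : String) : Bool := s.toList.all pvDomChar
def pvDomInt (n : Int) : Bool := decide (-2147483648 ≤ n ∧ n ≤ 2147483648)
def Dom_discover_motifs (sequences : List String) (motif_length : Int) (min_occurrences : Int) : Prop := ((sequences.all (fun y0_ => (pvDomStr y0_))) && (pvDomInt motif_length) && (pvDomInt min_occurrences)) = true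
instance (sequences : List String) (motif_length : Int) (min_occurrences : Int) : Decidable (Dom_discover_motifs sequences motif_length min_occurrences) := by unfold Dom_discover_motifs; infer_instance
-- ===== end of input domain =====

-- B replaces A's per-window all(c in 'ACGT') validity re-scan by splitting each sequence once into
-- maximal ACGT runs and counting every window of each run (objective: alternative).

-- ===== PORT A =====
-- 'c in "ACGT"' for a single character (used by both Pythons for the nucleotide test)
def pvValid (c : Char) : Bool := "ACGT".toList.contains c

def discover_motifs (sequences : List String) (motif_length : Int) (min_occurrences : Int) : List (String × Int) :=
  if sequences = [] ∨ motif_length ≤ 0 then []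
  else
    let counts : PySem.Dict String Int := sequences.foldl (fun d seq =>
      let s := PySem.Str.upper seq
      (PySem.List.pyRange 0 (PySem.Str.len s - motif_length + 1) 1).foldl (fun d i =>
        let kmer := PySem.Str.slice s (some i) (some (i + motif_length))
        if kmer.toList.all pvValid then d.modify kmer 0 (· + 1) else d) d) PySem.Dict.empty
    let filtered : List (String × Int) := counts.items.foldl
      (fun acc p => if p.2 ≥ min_occurrences then acc ++ [p] else acc) []
    PySem.List.sorted filtered (fun x => x.2) true

-- ===== PORT B =====
def dmAltRuns (seq : String) : List String :=
  let st : List String × String := seq.toList.foldl (fun st ch =>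
    if pvValid ch then (st.1, st.2.push ch)
    else (if st.2 ≠ "" then st.1 ++ [st.2] else st.1, "")) ([], "")
  if st.2 ≠ "" then st.1 ++ [st.2] else st.1

def discover_motifs_alt (sequences : List String) (motif_length : Int) (min_occurrences : Int) : List (String × Int) :=
  if sequences = [] ∨ motif_length ≤ 0 then []
  else
    let kmers : List String := sequences.foldl (fun acc seq =>
      (dmAltRuns (PySem.Str.upper seq)).foldl (fun acc run =>
        (PySem.List.pyRange 0 (PySem.Str.len run - motif_length + 1) 1).foldl (fun acc j =>
          acc ++ [PySem.Str.slice run (some j) (some (j + motif_length))]) acc) acc) []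
    let counts := PySem.Dict.counter kmers
    let filtered := counts.items.filter (fun p => p.2 ≥ min_occurrences)
    PySem.List.sorted filtered (fun x => x.2) true

-- ===== PRECONDITION & SPEC =====
def Spec_discover_motifs (sequences : List String) (motif_length : Int) (min_occurrences : Int) (out : List (String × Int)) : Prop := out = discover_motifs_alt sequences motif_length min_occurrences
instance (sequences : List String) (motif_length : Int) (min_occurrences : Int) (out : List (String × Int)) : Decidable (Spec_discover_motifs sequences motif_length min_occurrences out) := by unfold Spec_discover_motifs; infer_instance

-- ===== CLAIM (what is proved, stated in full; the proofs are below) =====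
def Claim_equal_discover_motifs : Prop := ∀ (sequences : List String) (motif_length : Int) (min_occurrences : Int), Dom_discover_motifs sequences motif_length min_occurrences → Spec_discover_motifs sequences motif_length min_occurrences (discover_motifs sequences motif_length min_occurrences)

-- ===== LEMMAS AND PROOFS =====

-- spec-level char windows
def wnd (k : Nat) (cs : List Char) : List (List Char) :=
  (List.range (cs.length + 1 - k)).map (fun i => (cs.drop i).take k)

def runsAux : List Char → List Char → List (List Char)
  | cur, [] => if cur = [] then [] else [cur]
  | cur, c :: t =>
    if pvValid c then runsAux (cur ++ [c]) t
    else (if cur = [] then [] else [cur]) ++ runsAux [] t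

lemma wnd_eq_nil (k : Nat) (cs : List Char) (h : cs.length + 1 ≤ k) : wnd k cs = [] := by
  simp [wnd, Nat.sub_eq_zero_of_le h]

lemma wnd_cons (k : Nat) (c : Char) (t : List Char) :
    wnd k (c :: t) = if k ≤ t.length + 1 then ((c :: t).take k) :: wnd k t else [] := by
  unfold wnd
  split
  · rename_i h
    have h2 : (c :: t).length + 1 - k = (t.length + 1 - k) + 1 := by simp; omega
    rw [h2, List.range_succ_eq_map]
    simp [List.map_map, Function.comp_def]
  · rename_i h
    have h2 : t.length + 1 + 1 - k = 0 := by omega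
    simp [h2]

lemma wnd_all_valid (k : Nat) (cs : List Char) (h : cs.all pvValid = true) :
    (wnd k cs).filter (fun w => w.all pvValid) = wnd k cs := by
  apply List.filter_eq_self.mpr
  intro w hw
  simp only [wnd, List.mem_map, List.mem_range] at hw
  obtain ⟨i, _, rfl⟩ := hw
  simp only [List.all_eq_true] at h ⊢
  intro c hc
  exact h c (List.mem_of_mem_drop (List.mem_of_mem_take hc))

lemma wnd_key (k : Nat) (hk : 1 ≤ k) (c : Char) (hc : pvValid c = false) :
    ∀ (cur t : List Char), cur.all pvValid = true →
    (wnd k (cur ++ c :: t)).filter (fun w => w.all pvValid)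
      = wnd k cur ++ (wnd k t).filter (fun w => w.all pvValid) := by
  intro cur
  induction cur with
  | nil =>
    intro t _
    rw [List.nil_append, wnd_cons k, wnd_eq_nil k [] (by simp; omega)]
    split
    · rename_i h
      have hbad : ((c :: t).take k).all pvValid = false := by
        obtain ⟨k', rfl⟩ : ∃ k', k = k' + 1 := ⟨k - 1, by omega⟩
        simp [hc]
      simp [hbad]
    · rename_i h
      rw [wnd_eq_nil k t (by omega)]
      simp
  | cons a cu ih =>
    intro t hval
    simp only [List.all_cons, Bool.and_eq_true] at hval
    obtain ⟨ha, hcu⟩ := hval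
    rw [List.cons_append, wnd_cons k]
    split
    · rename_i h
      simp only [List.length_append, List.length_cons] at h
      rw [List.filter_cons]
      by_cases hsmall : k ≤ cu.length + 1
      · have htake : ((a :: (cu ++ c :: t)).take k) = (a :: cu).take k := by
          rw [show a :: (cu ++ c :: t) = (a :: cu) ++ (c :: t) from rfl]
          exact List.take_append_of_le_length (by simp; omega)
        have hvalid : ((a :: (cu ++ c :: t)).take k).all pvValid = true := by
          rw [htake]
          have : (a :: cu).all pvValid = true := by simp [ha, hcu]
          simp only [List.all_eq_true] at this ⊢
          exact fun x hx => this x (List.mem_of_mem_take hx)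
        rw [hvalid, ih t hcu, wnd_cons k, if_pos hsmall, htake]
        simp
      · have hbad : ((a :: (cu ++ c :: t)).take k).all pvValid = false := by
          rw [show a :: (cu ++ c :: t) = (a :: cu) ++ (c :: t) from rfl,
            List.take_append,
            List.take_of_length_le (l := a :: cu) (by simp; omega)]
          obtain ⟨m, hm⟩ : ∃ m, k - (a :: cu).length = m + 1 :=
            ⟨k - (a :: cu).length - 1, by simp; omega⟩
          rw [hm]
          simp [hc]
        rw [hbad, ih t hcu, wnd_cons k, if_neg hsmall,
          wnd_eq_nil k cu (by omega)]
        simp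
    · rename_i h
      simp only [List.length_append, List.length_cons] at h
      rw [wnd_eq_nil k t (by omega), wnd_cons k, if_neg (by omega)]
      simp

lemma wnd_runs (k : Nat) (hk : 1 ≤ k) :
    ∀ (cs cur : List Char), cur.all pvValid = true →
    (wnd k (cur ++ cs)).filter (fun w => w.all pvValid)
      = (runsAux cur cs).flatMap (wnd k) := by
  intro cs
  induction cs with
  | nil =>
    intro cur hcur
    rw [List.append_nil, wnd_all_valid k cur hcur]
    unfold runsAux
    split
    · rename_i h; subst h; rw [wnd_eq_nil k [] (by simp; omega)]; simp
    · simp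
  | cons c t ih =>
    intro cur hcur
    unfold runsAux
    by_cases hc : pvValid c = true
    · rw [if_pos hc, show cur ++ c :: t = (cur ++ [c]) ++ t by simp]
      exact ih (cur ++ [c]) (by simp [List.all_append, hcur, hc])
    · rw [if_neg hc, wnd_key k hk c (by simpa using hc) cur t hcur,
        List.flatMap_append, ← ih [] rfl, List.nil_append]
      split
      · rename_i h; subst h; rw [wnd_eq_nil k [] (by simp; omega)]; simp
      · simp

def dmFlush (st : List String × String) : List String :=
  if st.2 ≠ "" then st.1 ++ [st.2] else st.1

def dmStep (st : List String × String) (ch : Char) : List String × String :=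
  if pvValid ch then (st.1, st.2.push ch)
  else (if st.2 ≠ "" then st.1 ++ [st.2] else st.1, "")

lemma runs_fold (cs : List Char) : ∀ (rs : List String) (cur : String),
    dmFlush (cs.foldl dmStep (rs, cur)) = rs ++ (runsAux cur.toList cs).map String.ofList := by
  induction cs with
  | nil =>
    intro rs cur
    simp only [List.foldl_nil]
    unfold runsAux dmFlush
    by_cases h : cur = ""
    · subst h; simp
    · rw [if_pos (by simpa using h), if_neg (by simpa using h)]
      simp [String.ofList_toList]
  | cons c t ih =>
    intro rs cur
    simp only [List.foldl_cons]
    by_cases hc : pvValid c = true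
    · rw [show dmStep (rs, cur) c = (rs, cur.push c) by simp [dmStep, hc]]
      rw [ih rs (cur.push c)]
      unfold runsAux
      rw [if_pos hc, String.toList_push]
      conv_rhs => rw [runsAux.eq_def]
    · by_cases h : cur = ""
      · rw [show dmStep (rs, cur) c = (rs, "") by simp [dmStep, hc, h]]
        rw [ih rs ""]
        unfold runsAux
        rw [if_neg hc]
        subst h
        simp only [String.toList_empty]
        conv_rhs => rw [runsAux.eq_def]
        simp
      · rw [show dmStep (rs, cur) c = (rs ++ [cur], "") by simp [dmStep, hc, h]]
        rw [ih (rs ++ [cur]) ""]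
        unfold runsAux
        rw [if_neg hc, if_neg (by simpa using h)]
        simp only [String.toList_empty, String.ofList_toList, List.map_append, List.map_cons,
          List.map_nil, List.append_assoc]
        conv_rhs => rw [runsAux.eq_def]

lemma dmAltRuns_eq (s : String) :
    dmAltRuns s = (runsAux [] s.toList).map String.ofList := by
  have h : dmAltRuns s = dmFlush (s.toList.foldl dmStep ([], "")) := rfl
  rw [h, runs_fold s.toList [] ""]
  simp

lemma pyWindows (s : String) (kn : Nat) :
    (PySem.List.pyRange 0 (PySem.Str.len s - (kn : Int) + 1) 1).map
        (fun j => PySem.Str.slice s (some j) (some (j + (kn : Int))))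
      = (wnd kn s.toList).map String.ofList := by
  rw [PySem.List.pyRange_one]
  have hn : ((PySem.Str.len s - (kn : Int) + 1) - 0).toNat = s.toList.length + 1 - kn := by
    simp; omega
  rw [hn, List.map_map]
  unfold wnd
  rw [List.map_map]
  apply List.map_congr_left
  intro i _
  simp only [Function.comp_apply, zero_add]
  have h2 : (PySem.Str.slice s (some (i : Int)) (some ((i : Int) + (kn : Int)))).toList
      = (s.toList.drop i).take kn := by
    simp [PySem.Str.toList_slice, PySem.Chars.slice_eq_listSlice, PySem.List.slice_natCast_add]
  rw [← h2, String.ofList_toList]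

def kmersA (kn : Nat) (s : String) : List String :=
  ((wnd kn s.toList).filter (fun w => w.all pvValid)).map String.ofList

def kmersB (kn : Nat) (s : String) : List String :=
  (dmAltRuns s).flatMap (fun run => (wnd kn run.toList).map String.ofList)

lemma kmersA_eq_kmersB (kn : Nat) (hk : 1 ≤ kn) (s : String) : kmersA kn s = kmersB kn s := by
  unfold kmersA kmersB
  rw [dmAltRuns_eq, List.flatMap_map]
  have h1 : (wnd kn s.toList).filter (fun w => w.all pvValid)
      = (runsAux [] s.toList).flatMap (wnd kn) := by
    have := wnd_runs kn hk s.toList [] rfl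
    simpa using this
  rw [h1, List.map_flatMap]
  apply List.flatMap_congr  -- may not exist; fallback below
  intro r _
  simp

lemma foldl_flatMap' {α β γ : Type} (l : List α) (g : α → List β) (f : γ → β → γ) (init : γ) :
    l.foldl (fun a x => (g x).foldl f a) init = (l.flatMap g).foldl f init := by
  induction l generalizing init with
  | nil => simp
  | cons x t ih => simp [List.foldl_append, ih]

lemma foldl_body_map {α β γ : Type} (l : List α) (f : α → β) (g : γ → β → γ) (init : γ) :
    l.foldl (fun a x => g a (f x)) init = (l.map f).foldl g init := by
  induction l generalizing init with
  | nil => simp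
  | cons x t ih => simp [ih]

lemma inner_A (kn : Nat) (s : String) (d : PySem.Dict String Int) :
    (PySem.List.pyRange 0 (PySem.Str.len s - (kn : Int) + 1) 1).foldl (fun d i =>
        if (PySem.Str.slice s (some i) (some (i + (kn : Int)))).toList.all pvValid then
          d.modify (PySem.Str.slice s (some i) (some (i + (kn : Int)))) 0 (· + 1)
        else d) d
      = (kmersA kn s).foldl (fun d w => d.modify w 0 (· + 1)) d := by
  calc (PySem.List.pyRange 0 (PySem.Str.len s - (kn : Int) + 1) 1).foldl (fun d i =>
        if (PySem.Str.slice s (some i) (some (i + (kn : Int)))).toList.all pvValid then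
          d.modify (PySem.Str.slice s (some i) (some (i + (kn : Int)))) 0 (· + 1)
        else d) d
      = ((PySem.List.pyRange 0 (PySem.Str.len s - (kn : Int) + 1) 1).map
          (fun i => PySem.Str.slice s (some i) (some (i + (kn : Int))))).foldl
          (fun d w => if w.toList.all pvValid then d.modify w 0 (· + 1) else d) d :=
        by rw [← foldl_body_map]
    _ = ((wnd kn s.toList).map String.ofList).foldl
          (fun d w => if w.toList.all pvValid then d.modify w 0 (· + 1) else d) d := by
        rw [pyWindows s kn]
    _ = (((wnd kn s.toList).map String.ofList).filter
          (fun w => w.toList.all pvValid)).foldl (fun d w => d.modify w 0 (· + 1)) d :=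
        by rw [PySem.List.foldl_if_eq_foldl_filter]
    _ = (kmersA kn s).foldl (fun d w => d.modify w 0 (· + 1)) d := by
        rw [List.filter_map]
        unfold kmersA
        congr 2
        apply List.filter_congr
        intro w _
        simp

lemma inner_B (kn : Nat) (s : String) (acc : List String) :
    (dmAltRuns s).foldl (fun acc run =>
        (PySem.List.pyRange 0 (PySem.Str.len run - (kn : Int) + 1) 1).foldl (fun acc j =>
          acc ++ [PySem.Str.slice run (some j) (some (j + (kn : Int)))]) acc) acc
      = acc ++ kmersB kn s := by
  have h1 : ∀ (run : String) (acc : List String),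
      (PySem.List.pyRange 0 (PySem.Str.len run - (kn : Int) + 1) 1).foldl (fun acc j =>
        acc ++ [PySem.Str.slice run (some j) (some (j + (kn : Int)))]) acc
      = acc ++ (wnd kn run.toList).map String.ofList := by
    intro run acc
    rw [PySem.List.foldl_append_singleton_eq_map, pyWindows run kn]
  calc (dmAltRuns s).foldl (fun acc run =>
        (PySem.List.pyRange 0 (PySem.Str.len run - (kn : Int) + 1) 1).foldl (fun acc j =>
          acc ++ [PySem.Str.slice run (some j) (some (j + (kn : Int)))]) acc) acc
      = (dmAltRuns s).foldl (fun acc run => acc ++ (wnd kn run.toList).map String.ofList) acc := by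
        apply PySem.List.foldl_congr_mem
        intro a run _
        exact h1 run a
    _ = acc ++ kmersB kn s := PySem.List.foldl_append_eq_flatMap _ _ _

theorem dm_eq (sequences : List String) (motif_length : Int) (min_occurrences : Int) :
    discover_motifs sequences motif_length min_occurrences
      = discover_motifs_alt sequences motif_length min_occurrences := by
  unfold discover_motifs discover_motifs_alt
  by_cases hg : sequences = [] ∨ motif_length ≤ 0
  · rw [if_pos hg, if_pos hg]
  · rw [if_neg hg, if_neg hg]
    have hk : 0 < motif_length := by
      rcases not_or.mp hg with ⟨_, h2⟩; omega
    obtain ⟨kn, hkn, hkn1⟩ : ∃ kn : Nat, motif_length = (kn : Int) ∧ 1 ≤ kn :=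
      ⟨motif_length.toNat, by omega, by omega⟩
    subst hkn
    have hA : sequences.foldl (fun d seq =>
        (PySem.List.pyRange 0 (PySem.Str.len (PySem.Str.upper seq) - (kn : Int) + 1) 1).foldl
          (fun d i =>
            if (PySem.Str.slice (PySem.Str.upper seq) (some i) (some (i + (kn : Int)))).toList.all pvValid then
              d.modify (PySem.Str.slice (PySem.Str.upper seq) (some i) (some (i + (kn : Int)))) 0 (· + 1)
            else d) d) (PySem.Dict.empty : PySem.Dict String Int)
        = PySem.Dict.counter (sequences.flatMap (fun seq => kmersA kn (PySem.Str.upper seq))) := by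
      calc _ = sequences.foldl (fun d seq =>
              (kmersA kn (PySem.Str.upper seq)).foldl (fun d w => d.modify w 0 (· + 1)) d)
              (PySem.Dict.empty : PySem.Dict String Int) := by
            apply PySem.List.foldl_congr_mem
            intro d seq _
            exact inner_A kn (PySem.Str.upper seq) d
        _ = (sequences.flatMap (fun seq => kmersA kn (PySem.Str.upper seq))).foldl
              (fun d w => d.modify w 0 (· + 1)) (PySem.Dict.empty : PySem.Dict String Int) :=
            foldl_flatMap' _ _ _ _
        _ = PySem.Dict.counter (sequences.flatMap (fun seq => kmersA kn (PySem.Str.upper seq))) := by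
            rw [PySem.Dict.counter_eq_foldl]
    have hB : sequences.foldl (fun acc seq =>
        (dmAltRuns (PySem.Str.upper seq)).foldl (fun acc run =>
          (PySem.List.pyRange 0 (PySem.Str.len run - (kn : Int) + 1) 1).foldl (fun acc j =>
            acc ++ [PySem.Str.slice run (some j) (some (j + (kn : Int)))]) acc) acc) []
        = sequences.flatMap (fun seq => kmersB kn (PySem.Str.upper seq)) := by
      calc _ = sequences.foldl (fun acc seq => acc ++ kmersB kn (PySem.Str.upper seq)) [] := by
            apply PySem.List.foldl_congr_mem
            intro acc seq _
            exact inner_B kn (PySem.Str.upper seq) acc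
        _ = [] ++ sequences.flatMap (fun seq => kmersB kn (PySem.Str.upper seq)) :=
            PySem.List.foldl_append_eq_flatMap _ _ _
        _ = _ := List.nil_append _
    have hflat : sequences.flatMap (fun seq => kmersA kn (PySem.Str.upper seq))
        = sequences.flatMap (fun seq => kmersB kn (PySem.Str.upper seq)) := by
      apply List.flatMap_congr
      intro seq _
      exact kmersA_eq_kmersB kn hkn1 (PySem.Str.upper seq)
    rw [hA, hB, hflat]
    dsimp only
    rw [PySem.List.foldl_append_ite_eq_filter]
    rw [List.nil_append]

-- ===== VERDICT (by name: the statement is the Claim_ definition above) =====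
theorem discover_motifs_spec : Claim_equal_discover_motifs := by
  intro sequences motif_length min_occurrences _
  unfold Spec_discover_motifs
  exact dm_eq sequences motif_length min_occurrences
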